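-- pv_equiv track=rewrite | github.com/Squinc-21/slavic | catchLines_new.py | get_x_profile
-- ===== SOURCE A (Python) =====
-- def get_x_profile(img):
--     width = len(img[0])
--     height = len(img)
--     x_profiles = []
--
--     for x in range(width):
--         bright = 0
--         for y in range(height):
--             pix = img[y][x]
--             if pix > 220:  # BLACK:
--                 bright += 1
--         x_profiles.append(bright)
--
--     return x_profiles
-- ===== SOURCE B (Python) =====
-- def get_x_profile(img):
--     width = len(img[0])
--     indicators = [[1 if row[x] > 220 else 0 for x in range(width)] for row in img]
--     profile = [0] * width
--     for ind in indicators: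
--         profile = [a + b for a, b in zip(profile, ind)]
--     return profile
-- ===== Notes on version B (the rewrite author's own statement) =====
-- stated objective: alternative
-- what changed: B first maps every row to a 0/1 indicator vector, then reduces the indicator vectors by element-wise zip addition, instead of A's nested index loops that finish one column counter at a time.
import Mathlib
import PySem

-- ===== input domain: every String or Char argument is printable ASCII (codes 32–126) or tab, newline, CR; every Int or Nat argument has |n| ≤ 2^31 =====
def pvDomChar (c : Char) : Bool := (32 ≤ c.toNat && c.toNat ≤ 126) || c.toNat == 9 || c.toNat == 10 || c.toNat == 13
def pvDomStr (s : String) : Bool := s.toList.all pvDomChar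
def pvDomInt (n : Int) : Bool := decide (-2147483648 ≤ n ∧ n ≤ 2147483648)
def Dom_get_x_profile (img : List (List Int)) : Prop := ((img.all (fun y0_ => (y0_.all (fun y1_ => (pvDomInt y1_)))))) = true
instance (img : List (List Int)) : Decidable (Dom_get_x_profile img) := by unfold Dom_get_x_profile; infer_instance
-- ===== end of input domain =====

-- B maps every row to a 0/1 indicator vector and reduces the vectors by element-wise
-- zip addition, instead of A's nested index loops (objective: alternative algorithm).

-- ===== PORT A =====
def get_x_profile (img : List (List Int)) : List Int :=
  let width : Int := ((PySem.List.pyGet? img 0).getD []).length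
  let height : Int := (img.length : Int)
  (PySem.List.pyRange 0 width 1).foldl (fun x_profiles x =>
    x_profiles ++ [(PySem.List.pyRange 0 height 1).foldl (fun bright y =>
      if PySem.List.pyGetD (PySem.List.pyGetD img y []) x 0 > 220 then bright + 1
      else bright) 0]) []

-- ===== PORT B =====
def get_x_profile_alt (img : List (List Int)) : List Int :=
  let width : Int := ((PySem.List.pyGet? img 0).getD []).length
  let indicators : List (List Int) := img.map (fun row =>
    (PySem.List.pyRange 0 width 1).map (fun x =>
      if PySem.List.pyGetD row x 0 > 220 then (1 : Int) else 0))
  indicators.foldl (fun profile ind => (profile.zip ind).map (fun p => p.1 + p.2))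
    (List.replicate width.toNat 0)

-- ===== PRECONDITION & SPEC =====
-- Pre_ excludes exactly the inputs where the Python A raises IndexError: the empty image
-- (img[0]) and ragged images with a row shorter than the first row (img[y][x]).
def Pre_get_x_profile (img : List (List Int)) : Prop :=
  img ≠ [] ∧ ∀ row ∈ img, (img.headD []).length ≤ row.length
instance (img : List (List Int)) : Decidable (Pre_get_x_profile img) := by
  unfold Pre_get_x_profile; infer_instance
def pvWitness_get_x_profile : List (List Int) := [[0, 255], [221, 7]]

def Spec_get_x_profile (img : List (List Int)) (out : List Int) : Prop := out = get_x_profile_alt img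
instance (img : List (List Int)) (out : List Int) : Decidable (Spec_get_x_profile img out) := by unfold Spec_get_x_profile; infer_instance

-- ===== CLAIM (what is proved, stated in full; the proofs are below) =====
def Claim_equal_get_x_profile : Prop := ∀ (img : List (List Int)), Dom_get_x_profile img → Pre_get_x_profile img → Spec_get_x_profile img (get_x_profile img)

-- ===== LEMMAS AND PROOFS =====

-- the per-column count of bright pixels over the rows, the common value of both ports
def pvCnt (rows : List (List Int)) (k : Nat) : Int :=
  (rows.countP (fun row => decide (PySem.List.pyGetD row (k : Int) 0 > 220)) : Int)

def pvInd (row : List Int) (k : Nat) : Int :=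
  if PySem.List.pyGetD row (k : Int) 0 > 220 then 1 else 0

theorem pvCnt_cons (row : List Int) (rows : List (List Int)) (k : Nat) :
    pvCnt (row :: rows) k = pvInd row k + pvCnt rows k := by
  simp only [pvCnt, pvInd, List.countP_cons, decide_eq_true_eq]
  split_ifs with h <;> push_cast <;> omega

-- A's inner loop counts the bright pixels of the rows at column x
theorem pvA_inner (rows : List (List Int)) (x : Int) (b : Int) :
    rows.foldl (fun bright row =>
      if PySem.List.pyGetD row x 0 > 220 then bright + 1 else bright) b
    = b + (rows.countP (fun row => decide (PySem.List.pyGetD row x 0 > 220)) : Int) := by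
  induction rows generalizing b with
  | nil => simp
  | cons r t ih =>
    simp only [List.foldl_cons, ih, List.countP_cons, decide_eq_true_eq]
    split_ifs with h <;> push_cast <;> omega

theorem pvA_eq (img : List (List Int)) :
    get_x_profile img
      = (List.range ((PySem.List.pyGet? img 0).getD []).length).map (pvCnt img) := by
  have hinner : ∀ x : Int,
      (PySem.List.pyRange 0 (img.length : Int) 1).foldl (fun (bright : Int) y =>
        if PySem.List.pyGetD (PySem.List.pyGetD img y []) x 0 > 220 then bright + 1
        else bright) (0 : Int)
      = img.foldl (fun (bright : Int) row =>
          if PySem.List.pyGetD row x 0 > 220 then bright + 1 else bright) (0 : Int) :=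
    fun x => PySem.List.foldl_pyRange_zero_pyGetD' img []
      (fun (bright : Int) row => if PySem.List.pyGetD row x 0 > 220 then bright + 1 else bright) (0 : Int)
  unfold get_x_profile
  rw [PySem.List.foldl_append_singleton_eq_map, List.nil_append]
  apply List.ext_getElem
  · simp [PySem.List.length_pyRange_one]
  · intro i h1 h2
    simp only [List.getElem_map, PySem.List.getElem_pyRange_one, List.getElem_range, zero_add]
    refine (hinner (i : Int)).trans ?_
    rw [pvA_inner]
    simp [pvCnt]

-- one zip-addition step: adding a row's indicator vector to a length-w profile
theorem pvB_step (row : List Int) (p : List Int) (w : Nat) (hp : p.length = w) :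
    ((p.zip ((PySem.List.pyRange 0 (w : Int) 1).map (fun x =>
        if PySem.List.pyGetD row x 0 > 220 then (1 : Int) else 0))).map (fun q => q.1 + q.2))
    = (List.range w).map (fun k => p.getD k 0 + pvInd row k) := by
  apply List.ext_getElem
  · simp [PySem.List.length_pyRange_one, hp]
  · intro i h1 h2
    have hiw : i < w := by simpa using h2
    have hip : i < p.length := by omega
    simp only [List.getElem_map, List.getElem_zip, List.getElem_range,
      PySem.List.getElem_pyRange_one, zero_add, pvInd]
    rw [List.getD_eq_getElem _ _ hip]

-- B's fold over the indicator vectors adds the per-column counts to the accumulator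
theorem pvB_outer (w : Nat) (rows : List (List Int)) :
    ∀ p : List Int, p.length = w →
    rows.foldl (fun profile row =>
      ((profile.zip ((PySem.List.pyRange 0 (w : Int) 1).map (fun x =>
          if PySem.List.pyGetD row x 0 > 220 then (1 : Int) else 0))).map (fun q => q.1 + q.2))) p
    = (List.range w).map (fun k => p.getD k 0 + pvCnt rows k) := by
  induction rows with
  | nil =>
    intro p hp
    simp only [List.foldl_nil, pvCnt, List.countP_nil, Int.natCast_zero, add_zero]
    apply List.ext_getElem
    · simp [hp]
    · intro i h1 h2
      rw [List.getElem_map, List.getElem_range, List.getD_eq_getElem _ _ (by simpa [hp] using h2)]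
  | cons row rows ih =>
    intro p hp
    rw [List.foldl_cons, pvB_step row p w hp,
      ih ((List.range w).map (fun k => p.getD k 0 + pvInd row k)) (by simp)]
    apply List.map_congr_left
    intro k hk
    have hkw : k < w := List.mem_range.mp hk
    rw [List.getD_eq_getElem _ _ (by simpa using hkw)]
    simp only [List.getElem_map, List.getElem_range, pvCnt_cons]
    ring

theorem pvB_eq (img : List (List Int)) :
    get_x_profile_alt img
      = (List.range ((PySem.List.pyGet? img 0).getD []).length).map (pvCnt img) := by
  unfold get_x_profile_alt
  rw [List.foldl_map, pvB_outer _ img (List.replicate _ 0) (by simp)]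
  apply List.map_congr_left
  intro k hk
  simp

-- ===== VERDICT (by name: the statement is the Claim_ definition above) =====
theorem get_x_profile_spec : Claim_equal_get_x_profile := by
  intro img _ _
  unfold Spec_get_x_profile
  rw [pvA_eq, pvB_eq]
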